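-- pv_equiv track=rewrite | github.com/monkeydunkey/interviewCakeProblems | reverseWordsInStr.py | reverseStrWords
-- ===== SOURCE A (Python) =====
-- def reverseWord(st, stInd, stpInd):
--     for i in range(0, (stpInd - stInd)//2 + 1):
--         st[stInd + i], st[stpInd - i] =  st[stpInd - i], st[stInd + i]
--
-- def reverseStrWords(st):
--     stli = list(st)
--     stInd = 0
--     for i, c_ in enumerate(stli):
--         if c_ == '.':
--             #we found a word end
--             reverseWord(stli, stInd, i-1)
--             stInd = i + 1
--     reverseWord(stli, stInd, len(stli) - 1)
--     return ''.join(stli)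
-- ===== SOURCE B (Python) =====
-- def reverseStrWords(st):
--     return '.'.join(w[::-1] for w in st.split('.'))
-- ===== Notes on version B (the rewrite author's own statement) =====
-- stated objective: idiomatic
-- what changed: Replaces the manual char-list mutation with per-segment two-pointer swaps by a single split on the dot separator, slice-reversal of each part, and a join; same O(n) asymptotics but the work moves into C-level string primitives.
import Mathlib
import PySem

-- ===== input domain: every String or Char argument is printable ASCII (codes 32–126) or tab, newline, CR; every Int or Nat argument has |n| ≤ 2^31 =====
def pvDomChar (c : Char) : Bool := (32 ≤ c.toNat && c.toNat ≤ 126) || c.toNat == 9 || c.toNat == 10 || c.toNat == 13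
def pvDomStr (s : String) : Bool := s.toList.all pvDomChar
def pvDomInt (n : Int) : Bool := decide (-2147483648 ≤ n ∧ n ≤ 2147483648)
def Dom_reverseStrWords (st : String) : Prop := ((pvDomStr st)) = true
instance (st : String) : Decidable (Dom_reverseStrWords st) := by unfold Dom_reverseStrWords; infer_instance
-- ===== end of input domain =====

-- B reverses each '.'-separated word idiomatically via split / slice-reverse / join instead of
-- A's in-place two-pointer swapping on a character list; same return value, no observable mutation.

-- ===== PORT A =====
-- Python tuple assignment `st[a], st[b] = st[b], st[a]`; in A's calls both indices are always
-- in range and nonnegative, so the fallthrough branch (where Python would raise) is unreachable.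
def pySwapAt (l : List Char) (a b : Int) : List Char :=
  match PySem.List.pyGet? l a, PySem.List.pyGet? l b with
  | some x, some y =>
      ((l.set (if a < 0 then a + l.length else a).toNat y).set
        (if b < 0 then b + l.length else b).toNat x)
  | _, _ => l

-- reverseWord(st, stInd, stpInd): for i in range(0, (stpInd - stInd)//2 + 1): swap
def reverseWordA (st : List Char) (stInd stpInd : Int) : List Char :=
  (PySem.List.pyRange 0 (PySem.Int.floordiv (stpInd - stInd) 2 + 1)).foldl
    (fun acc i => pySwapAt acc (stInd + i) (stpInd - i)) st

-- `for i, c_ in enumerate(stli)` iterates the LIVE mutated list, so each step reads stli[i]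
-- from the current list (positions ≥ i are in fact never mutated before being read).
def reverseStrWords (st : String) : String :=
  let stli := st.toList
  let r := (List.range stli.length).foldl
    (fun (s : List Char × Int) (i : Nat) =>
      if PySem.List.pyGet? s.1 (i : Int) = some '.' then (reverseWordA s.1 s.2 ((i : Int) - 1), (i : Int) + 1)
      else s)
    (stli, 0)
  String.ofList (reverseWordA r.1 r.2 ((r.1.length : Int) - 1))

-- ===== PORT B =====
-- '.'.join(w[::-1] for w in st.split('.')); the `none` arms are unreachable:
-- the separator "." is nonempty and the slice step -1 is nonzero.
def reverseStrWords_alt (st : String) : String :=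
  match PySem.Str.split? st "." with
  | some parts => PySem.Str.join "." (parts.map (fun w => (PySem.Str.slice? w none none (-1)).getD w))
  | none => st

-- ===== PRECONDITION & SPEC =====
def Spec_reverseStrWords (st : String) (out : String) : Prop := out = reverseStrWords_alt st
instance (st : String) (out : String) : Decidable (Spec_reverseStrWords st out) := by unfold Spec_reverseStrWords; infer_instance

-- ===== CLAIM (what is proved, stated in full; the proofs are below) =====
def Claim_equal_reverseStrWords : Prop := ∀ (st : String), Dom_reverseStrWords st → Spec_reverseStrWords st (reverseStrWords st)

-- ===== LEMMAS AND PROOFS =====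

-- str.split('.') as a structural recursion on the character list
def mySplit : List Char → List (List Char)
  | [] => [[]]
  | c :: r => if c = '.' then [] :: mySplit r else (mySplit r).modifyHead (c :: ·)

-- state after A's main loop: (prefix with every completed word reversed, untouched last word)
def procWs : List (List Char) → List Char × List Char
  | [] => ([], [])
  | [w] => ([], w)
  | w :: w₂ :: ws => ((w.reverse ++ '.' :: (procWs (w₂ :: ws)).1), (procWs (w₂ :: ws)).2)

-- the body of A's main loop
def stepF (s : List Char × Int) (i : Nat) : List Char × Int :=
  if PySem.List.pyGet? s.1 (i : Int) = some '.' then (reverseWordA s.1 s.2 ((i : Int) - 1), (i : Int) + 1)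
  else s

lemma mySplit_ne_nil (l : List Char) : mySplit l ≠ [] := by
  induction l with
  | nil => simp [mySplit]
  | cons c r ih =>
    simp only [mySplit]
    split_ifs
    · simp
    · cases h : mySplit r with
      | nil => exact absurd h ih
      | cons w ws => simp

lemma mySplit_no_dot (l : List Char) (h : ∀ c ∈ l, c ≠ '.') : mySplit l = [l] := by
  induction l with
  | nil => rfl
  | cons c r ih =>
    have hc : c ≠ '.' := h c (by simp)
    simp only [mySplit, if_neg hc]
    rw [ih (fun d hd => h d (by simp [hd]))]
    rfl

lemma mySplit_append_dot (seg r : List Char) (h : ∀ c ∈ seg, c ≠ '.') :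
    mySplit (seg ++ '.' :: r) = seg :: mySplit r := by
  induction seg with
  | nil => simp [mySplit]
  | cons c s ih =>
    have hc : c ≠ '.' := h c (by simp)
    simp only [List.cons_append, mySplit, if_neg hc]
    rw [ih (fun d hd => h d (by simp [hd]))]
    rfl

lemma firstDot (l : List Char) :
    (∀ c ∈ l, c ≠ '.') ∨ ∃ seg r, l = seg ++ '.' :: r ∧ ∀ c ∈ seg, c ≠ '.' := by
  induction l with
  | nil => left; simp
  | cons c t ih =>
    by_cases hc : c = '.'
    · right; exact ⟨[], t, by simp [hc], by simp⟩
    · rcases ih with h | ⟨seg, r, rfl, hseg⟩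
      · left; intro d hd
        rcases List.mem_cons.mp hd with rfl | hd'
        · exact hc
        · exact h d hd'
      · right
        exact ⟨c :: seg, r, by simp, by intro d hd; rcases List.mem_cons.mp hd with rfl | hd; exact hc; exact hseg d hd⟩

lemma splitOn_go_spec (fuel : Nat) : ∀ (l cur : List Char) (hacc : List (List Char)),
    l.length < fuel →
    PySem.Chars.splitOn.go ['.'] fuel l cur hacc = hacc.reverse ++ (mySplit l).modifyHead (cur.reverse ++ ·) := by
  induction fuel with
  | zero => intro l cur hacc h; omega
  | succ f ih =>
    intro l cur hacc h
    cases l with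
    | nil => simp [PySem.Chars.splitOn.go, mySplit]
    | cons c rest =>
      rw [PySem.Chars.splitOn.go]
      by_cases hc : c = '.'
      · subst hc
        rw [if_pos (by simp [List.isPrefixOf])]
        rw [ih _ _ _ (by simp at h ⊢; omega)]
        obtain ⟨w, ws, hw⟩ : ∃ w ws, mySplit rest = w :: ws := by
          cases hmw : mySplit rest with
          | nil => exact absurd hmw (mySplit_ne_nil rest)
          | cons w ws => exact ⟨w, ws, rfl⟩
        simp [mySplit, hw]
      · rw [if_neg (by simp [List.isPrefixOf]; exact fun hh => hc hh.symm)]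
        rw [ih _ _ _ (by simp at h ⊢; omega)]
        obtain ⟨w, ws, hw⟩ : ∃ w ws, mySplit rest = w :: ws := by
          cases hmw : mySplit rest with
          | nil => exact absurd hmw (mySplit_ne_nil rest)
          | cons w ws => exact ⟨w, ws, rfl⟩
        simp [mySplit, hw, if_neg hc]

lemma splitOn_eq_mySplit (l : List Char) : PySem.Chars.splitOn l ['.'] = mySplit l := by
  rw [PySem.Chars.splitOn, splitOn_go_spec _ _ _ _ (by omega)]
  obtain ⟨w, ws, hw⟩ : ∃ w ws, mySplit l = w :: ws := by
    cases hmw : mySplit l with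
    | nil => exact absurd hmw (mySplit_ne_nil l)
    | cons w ws => exact ⟨w, ws, rfl⟩
  simp [hw]

lemma alt_eq (st : String) :
    reverseStrWords_alt st
      = String.ofList (List.intercalate ['.'] ((mySplit st.toList).map List.reverse)) := by
  have hsep : (".".toList : List Char) = ['.'] := rfl
  have h1 : PySem.Str.split? st "." = some ((mySplit st.toList).map String.ofList) := by
    rw [PySem.Str.split?, PySem.Chars.split?, hsep]
    rw [if_neg (by simp)]
    simp [splitOn_eq_mySplit]
  rw [reverseStrWords_alt, h1]
  simp only [List.map_map]
  have h2 : ((fun w => (PySem.Str.slice? w none none (-1)).getD w) ∘ String.ofList)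
      = fun cs => String.ofList cs.reverse := by
    funext cs
    simp [PySem.Str.slice?_none_none_neg_one, String.toList_ofList]
  rw [h2, PySem.Str.join]
  congr 1
  rw [PySem.Chars.join]
  congr 1
  simp [List.map_map, Function.comp_def, String.toList_ofList]

lemma pySwapAt_pair (pre mid post : List Char) (x y : Char) (a b : Int)
    (ha : a = (pre.length : Int)) (hb : b = (pre.length : Int) + mid.length + 1) :
    pySwapAt (pre ++ x :: (mid ++ y :: post)) a b = pre ++ y :: (mid ++ x :: post) := by
  subst ha hb
  have hb' : ((pre.length : Int) + mid.length + 1) = ((pre.length + mid.length + 1 : Nat) : Int) := by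
    push_cast; ring
  have hget1 : PySem.List.pyGet? (pre ++ x :: (mid ++ y :: post)) (pre.length : Int) = some x := by
    rw [PySem.List.pyGet?_natCast]; simp
  have hget2 : PySem.List.pyGet? (pre ++ x :: (mid ++ y :: post)) ((pre.length : Int) + mid.length + 1) = some y := by
    rw [hb', PySem.List.pyGet?_natCast]
    have : pre ++ x :: (mid ++ y :: post) = (pre ++ x :: mid) ++ y :: post := by simp
    rw [this]
    have hl : pre.length + mid.length + 1 = (pre ++ x :: mid).length := by simp; omega
    rw [hl]; simp
  rw [pySwapAt, hget1, hget2]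
  dsimp only
  rw [if_neg (by omega), if_neg (by omega)]
  have ht1 : ((pre.length : Int)).toNat = pre.length := by omega
  have ht2 : ((pre.length : Int) + mid.length + 1).toNat = pre.length + mid.length + 1 := by omega
  rw [ht1, ht2]
  have hset1 : (pre ++ x :: (mid ++ y :: post)).set pre.length y = pre ++ y :: (mid ++ y :: post) := by
    simp
  rw [hset1]
  have : pre ++ y :: (mid ++ y :: post) = (pre ++ y :: mid) ++ y :: post := by simp
  rw [this]
  have hl : pre.length + mid.length + 1 = (pre ++ y :: mid).length := by simp; omega
  rw [hl]
  simp

lemma pySwapAt_self (pre post : List Char) (x : Char) (a : Int) (ha : a = (pre.length : Int)) :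
    pySwapAt (pre ++ x :: post) a a = pre ++ x :: post := by
  subst ha
  have hget : PySem.List.pyGet? (pre ++ x :: post) (pre.length : Int) = some x := by
    rw [PySem.List.pyGet?_natCast]; simp
  rw [pySwapAt, hget]
  dsimp only
  rw [if_neg (by omega)]
  have ht : ((pre.length : Int)).toNat = pre.length := by omega
  rw [ht]
  simp

lemma swapLoop (d : Nat) : ∀ (seg pre post : List Char), seg.length = d →
    (List.range ((d + 1) / 2)).foldl
      (fun acc (i : Nat) => pySwapAt acc ((pre.length : Int) + i) ((pre.length : Int) + d - 1 - i))
      (pre ++ seg ++ post)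
    = pre ++ seg.reverse ++ post := by
  induction d using Nat.strong_induction_on with
  | _ d ih =>
    intro seg pre post hlen
    match d, seg, hlen with
    | 0, [], _ => rfl
    | 1, [x], _ =>
      simp only [show (1+1)/2 = 1 from rfl, List.range_one, List.foldl_cons, List.foldl_nil]
      have h1 : ((pre.length : Int) + (0:Nat)) = (pre.length : Int) := by push_cast; ring
      have h2 : ((pre.length : Int) + (1:Nat) - 1 - (0:Nat)) = (pre.length : Int) := by push_cast; ring
      rw [h1, h2]
      have e : pre ++ [x] ++ post = pre ++ x :: post := by simp
      rw [e, pySwapAt_self pre post x _ rfl]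
      simp
    | (d'+2), c :: t, hlen =>
      have ht : t ≠ [] := by intro h; subst h; simp at hlen
      obtain ⟨mid, y, rfl⟩ : ∃ mid y, t = mid ++ [y] := by
        rcases List.eq_nil_or_concat t with h | ⟨mid, y, h⟩
        · exact absurd h ht
        · exact ⟨mid, y, by simp [h]⟩
      have hmid : mid.length = d' := by simp at hlen; omega
      have hhalf : (d' + 2 + 1) / 2 = (d' + 1) / 2 + 1 := by omega
      rw [hhalf, List.range_succ_eq_map, List.foldl_cons, List.foldl_map]
      -- first swap
      have hfirst :
          pySwapAt (pre ++ (c :: (mid ++ [y])) ++ post) ((pre.length : Int) + (0:Nat)) ((pre.length : Int) + (d'+2:Nat) - 1 - (0:Nat))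
            = pre ++ y :: (mid ++ c :: post) := by
        have e1 : pre ++ (c :: (mid ++ [y])) ++ post = pre ++ c :: (mid ++ y :: post) := by simp
        rw [e1]
        apply pySwapAt_pair
        · push_cast; ring
        · rw [hmid]; push_cast; ring  -- d' = mid.length
      rw [hfirst]
      -- re-index and apply IH
      have e2 : pre ++ y :: (mid ++ c :: post) = (pre ++ [y]) ++ mid ++ (c :: post) := by simp
      have hfun : (fun (acc : List Char) (i : Nat) =>
            pySwapAt acc ((pre.length : Int) + (i.succ : Nat)) ((pre.length : Int) + (d'+2:Nat) - 1 - (i.succ : Nat)))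
          = (fun (acc : List Char) (i : Nat) =>
            pySwapAt acc (((pre ++ [y]).length : Int) + i) (((pre ++ [y]).length : Int) + (mid.length : Nat) - 1 - i)) := by
        funext acc i
        congr 1
        · simp; ring
        · simp [hmid]
          ring
      rw [e2, hfun]
      have hh : (d' + 1) / 2 = (mid.length + 1) / 2 := by omega
      rw [hh, ih mid.length (by omega) mid (pre ++ [y]) (c :: post) rfl]
      simp

lemma revWord_eq (seg pre post : List Char) :
    reverseWordA (pre ++ seg ++ post) (pre.length : Int) ((pre.length : Int) + seg.length - 1)
      = pre ++ seg.reverse ++ post := by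
  rw [reverseWordA]
  have hk : PySem.Int.floordiv ((pre.length : Int) + seg.length - 1 - pre.length) 2 + 1
      = (((seg.length + 1) / 2 : Nat) : Int) := by
    rw [PySem.Int.floordiv_eq_ediv_of_pos (by omega)]
    omega
  rw [hk, PySem.List.pyRange_zero_natCast, List.foldl_map]
  have hfun : (fun (acc : List Char) (k : Nat) =>
        pySwapAt acc ((pre.length : Int) + (k:Int)) ((pre.length : Int) + seg.length - 1 - (k:Int)))
      = (fun (acc : List Char) (i : Nat) =>
        pySwapAt acc ((pre.length : Int) + i) ((pre.length : Int) + (seg.length : Nat) - 1 - i)) := rfl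
  rw [hfun]
  exact swapLoop seg.length seg pre post rfl

lemma skipSeg (seg : List Char) : ∀ (pre post : List Char) (s0 : Int), (∀ c ∈ seg, c ≠ '.') →
    (List.range' pre.length seg.length).foldl stepF (pre ++ seg ++ post, s0)
      = (pre ++ seg ++ post, s0) := by
  induction seg with
  | nil => intro pre post s0 _; simp
  | cons c t ih =>
    intro pre post s0 h
    have hc : c ≠ '.' := h c (by simp)
    rw [List.length_cons, List.range'_succ, List.foldl_cons]
    have hget : PySem.List.pyGet? (pre ++ c :: t ++ post) ((pre.length : Nat) : Int) = some c := by
      rw [PySem.List.pyGet?_natCast]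
      have e : pre ++ c :: t ++ post = pre ++ c :: (t ++ post) := by simp
      rw [e]; simp
    have hstep : stepF (pre ++ c :: t ++ post, s0) pre.length = (pre ++ c :: t ++ post, s0) := by
      rw [stepF]
      rw [if_neg (by rw [hget]; simp [hc])]
    rw [hstep]
    have e2 : pre ++ c :: t ++ post = (pre ++ [c]) ++ t ++ post := by simp
    have e3 : pre.length + 1 = (pre ++ [c]).length := by simp
    rw [e2, e3]
    exact ih (pre ++ [c]) post s0 (fun d hd => h d (by simp [hd]))

lemma dotStep (seg pre post : List Char) (h : ∀ c ∈ seg, c ≠ '.') :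
    (List.range' pre.length (seg.length + 1)).foldl stepF (pre ++ seg ++ '.' :: post, (pre.length : Int))
      = (pre ++ seg.reverse ++ '.' :: post, ((pre.length + seg.length + 1 : Nat) : Int)) := by
  rw [List.range'_concat, List.foldl_append]
  rw [skipSeg seg pre ('.' :: post) _ h]
  simp only [List.foldl_cons, List.foldl_nil]
  have hget : PySem.List.pyGet? (pre ++ seg ++ '.' :: post) (((pre.length + 1 * seg.length : Nat)) : Int) = some '.' := by
    rw [PySem.List.pyGet?_natCast]
    have e : pre.length + 1 * seg.length = (pre ++ seg).length := by simp
    rw [e]; simp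
  rw [stepF, if_pos hget]
  dsimp only
  simp only [Prod.mk.injEq]
  refine ⟨?_, ?_⟩
  · have e : ((pre.length + 1 * seg.length : Nat) : Int) - 1 = (pre.length : Int) + seg.length - 1 := by
      push_cast; ring
    rw [e, revWord_eq seg pre ('.' :: post)]
  · push_cast; ring

lemma mainLoop (n : Nat) : ∀ (rest pre : List Char), rest.length = n →
    (List.range' pre.length rest.length).foldl stepF (pre ++ rest, (pre.length : Int))
      = (pre ++ (procWs (mySplit rest)).1 ++ (procWs (mySplit rest)).2,
         ((pre.length + (procWs (mySplit rest)).1.length : Nat) : Int)) := by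
  induction n using Nat.strong_induction_on with
  | _ n ih =>
    intro rest pre hlen
    rcases firstDot rest with h | ⟨seg, r, rfl, hseg⟩
    · rw [mySplit_no_dot rest h]
      have e : pre ++ rest = pre ++ rest ++ [] := by simp
      rw [e, skipSeg rest pre [] _ h]
      simp [procWs]
    · have hsplit : mySplit (seg ++ '.' :: r) = seg :: mySplit r := mySplit_append_dot seg r hseg
      obtain ⟨w, ws, hw⟩ : ∃ w ws, mySplit r = w :: ws := by
        cases hmw : mySplit r with
        | nil => exact absurd hmw (mySplit_ne_nil r)
        | cons w ws => exact ⟨w, ws, rfl⟩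
      have hlen2 : (seg ++ '.' :: r).length = seg.length + 1 + r.length := by simp; omega
      have hrange : List.range' pre.length (seg ++ '.' :: r).length
          = List.range' pre.length (seg.length + 1) ++ List.range' (pre.length + (seg.length + 1)) r.length := by
        rw [hlen2]
        rw [← List.range'_append (s := pre.length) (m := seg.length + 1) (n := r.length) (step := 1)]
        simp [Nat.add_comm]
      rw [hrange, List.foldl_append]
      have e1 : pre ++ (seg ++ '.' :: r) = pre ++ seg ++ '.' :: r := by simp
      rw [e1, dotStep seg pre r hseg]
      have e2 : pre ++ seg.reverse ++ '.' :: r = (pre ++ seg.reverse ++ ['.']) ++ r := by simp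
      have e3 : pre.length + seg.length + 1 = (pre ++ seg.reverse ++ ['.']).length := by simp; omega
      have e4 : pre.length + (seg.length + 1) = (pre ++ seg.reverse ++ ['.']).length := by simp
      rw [e2, e3, e4]
      rw [ih r.length (by omega) r (pre ++ seg.reverse ++ ['.']) rfl]
      rw [hsplit, hw]
      simp only [procWs, ← hw]
      simp only [Prod.mk.injEq]
      refine ⟨?_, ?_⟩
      · simp
      · simp; omega

lemma inter_eq (ws : List (List Char)) (h : ws ≠ []) :
    List.intercalate ['.'] (ws.map List.reverse) = (procWs ws).1 ++ (procWs ws).2.reverse := by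
  induction ws with
  | nil => simp at h
  | cons w t ih =>
    cases t with
    | nil => simp [procWs, List.intercalate]
    | cons y ys =>
      simp only [List.map_cons, List.intercalate, List.intersperse_cons₂, List.flatten_cons]
      have := ih (by simp)
      simp only [List.map_cons, List.intercalate] at this
      rw [this]
      simp [procWs]

-- ===== VERDICT (by name: the statement is the Claim_ definition above) =====
theorem reverseStrWords_spec : Claim_equal_reverseStrWords := by
  intro st _
  unfold Spec_reverseStrWords
  rw [alt_eq]
  simp only [reverseStrWords]
  rw [List.range_eq_range']
  have hlam : (fun (s : List Char × Int) (i : Nat) =>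
      if PySem.List.pyGet? s.1 (i : Int) = some '.' then (reverseWordA s.1 s.2 ((i : Int) - 1), (i : Int) + 1)
      else s) = stepF := rfl
  rw [hlam]
  have hfold := mainLoop st.toList.length st.toList [] rfl
  simp only [List.nil_append, List.length_nil, Nat.zero_add, Nat.cast_zero] at hfold
  rw [hfold]
  obtain ⟨wh, wt, hw⟩ : ∃ wh wt, mySplit st.toList = wh :: wt := by
    cases hmw : mySplit st.toList with
    | nil => exact absurd hmw (mySplit_ne_nil st.toList)
    | cons w ws => exact ⟨w, ws, rfl⟩
  rw [inter_eq _ (by rw [hw]; simp)]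
  set P := (procWs (mySplit st.toList)).1 with hP
  set w := (procWs (mySplit st.toList)).2 with hwdef
  have hidx : (((P ++ w).length : Int)) - 1 = (P.length : Int) + w.length - 1 := by
    simp
  dsimp only
  rw [hidx]
  have := revWord_eq w P []
  simp only [List.append_nil] at this
  rw [this]
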